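-- pv_equiv track=rewrite | github.com/TBSKBJustin/CMediaAuto | controller/workflow_controller.py | _get_enabled_modules
-- ===== SOURCE A (Python) =====
-- from typing import Dict, List, Optional
--
-- def _get_enabled_modules(event_config: Dict) -> List[str]:
--     """Extract enabled modules from event configuration in correct execution order"""
--     modules_config = event_config.get("modules", {})
--
--     # Define the correct execution order
--     # subtitles → correction → summary (generates image prompt) → thumbnail_ai → thumbnail_compose
--     module_order = [
--         "subtitles",
--         "subtitle_correction",
--         "content_summary",
--         "thumbnail_ai",
--         "thumbnail_compose",
--         "ai_content",  # Legacy combined module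
--         "publish_youtube",
--         "publish_website",
--         "archive",
--         "live_control",
--         "ingest_obs_monitor"
--     ]
--
--     # Return only enabled modules in the correct order
--     enabled_modules = []
--     for module_name in module_order:
--         if modules_config.get(module_name, False):
--             enabled_modules.append(module_name)
--
--     # Include any other enabled modules not in the predefined order (for extensibility)
--     for module_name, enabled in modules_config.items():
--         if enabled and module_name not in enabled_modules:
--             enabled_modules.append(module_name)
--
--     return enabled_modules
-- ===== SOURCE B (Python) =====
-- def _get_enabled_modules(event_config):
--     """Enabled modules via a stable sort keyed by predefined rank (extras rank last)."""
--     modules_config = event_config.get("modules", {})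
--
--     module_order = [
--         "subtitles",
--         "subtitle_correction",
--         "content_summary",
--         "thumbnail_ai",
--         "thumbnail_compose",
--         "ai_content",
--         "publish_youtube",
--         "publish_website",
--         "archive",
--         "live_control",
--         "ingest_obs_monitor"
--     ]
--
--     order_index = {name: i for i, name in enumerate(module_order)}
--     sentinel = len(module_order)
--     enabled = [name for name, on in modules_config.items() if on]
--     return sorted(enabled, key=lambda name: order_index.get(name, sentinel))
-- ===== Notes on version B (the rewrite author's own statement) =====
-- stated objective: alternative
-- what changed: Replaces A's two appending passes (a scan of module_order with dict lookups, then a scan of the config items with a membership test against the growing result list) by building an index map once and stably sorting the enabled names by their predefined rank, with a sentinel rank for extras.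
import Mathlib
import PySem

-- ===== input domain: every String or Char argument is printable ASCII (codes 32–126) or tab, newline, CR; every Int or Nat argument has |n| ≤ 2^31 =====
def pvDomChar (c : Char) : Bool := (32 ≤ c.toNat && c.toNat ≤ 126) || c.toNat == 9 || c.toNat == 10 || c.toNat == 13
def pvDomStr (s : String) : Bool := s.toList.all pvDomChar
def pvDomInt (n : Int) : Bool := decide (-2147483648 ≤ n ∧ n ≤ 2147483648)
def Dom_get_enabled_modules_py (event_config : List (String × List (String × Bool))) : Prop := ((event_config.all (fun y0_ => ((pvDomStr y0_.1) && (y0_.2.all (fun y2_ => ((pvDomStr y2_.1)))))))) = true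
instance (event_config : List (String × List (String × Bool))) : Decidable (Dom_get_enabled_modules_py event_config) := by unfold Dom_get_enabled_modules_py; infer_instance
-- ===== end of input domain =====

-- B replaces A's two appending passes (scan of module_order with dict lookups, then a
-- scan of the items with a growing-list membership test) by one stable sort of the
-- enabled names keyed by their predefined rank; objective: alternative (no speed claim).

-- ===== PORT A =====
def get_enabled_modules_py (event_config : List (String × List (String × Bool))) : List String :=
  let modules_config : List (String × Bool) :=
    ((event_config.find? (fun p => p.1 == "modules")).map (·.2)).getD []
  let module_order : List String :=
    ["subtitles", "subtitle_correction", "content_summary", "thumbnail_ai",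
     "thumbnail_compose", "ai_content", "publish_youtube", "publish_website",
     "archive", "live_control", "ingest_obs_monitor"]
  let enabled_modules : List String :=
    module_order.foldl
      (fun acc module_name =>
        if ((modules_config.find? (fun p => p.1 == module_name)).map (·.2)).getD false
        then acc ++ [module_name] else acc)
      []
  modules_config.foldl
    (fun acc p => if p.2 && !(acc.contains p.1) then acc ++ [p.1] else acc)
    enabled_modules

-- ===== PORT B =====
def get_enabled_modules_py_alt (event_config : List (String × List (String × Bool))) : List String :=
  let modules_config : List (String × Bool) :=
    ((event_config.find? (fun p => p.1 == "modules")).map (·.2)).getD []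
  let module_order : List String :=
    ["subtitles", "subtitle_correction", "content_summary", "thumbnail_ai",
     "thumbnail_compose", "ai_content", "publish_youtube", "publish_website",
     "archive", "live_control", "ingest_obs_monitor"]
  let order_index : PySem.Dict String Int :=
    (PySem.List.enumerate module_order).foldl (fun d p => d.insert p.2 p.1) PySem.Dict.empty
  let sentinel : Int := PySem.List.len module_order
  let enabled : List String := (modules_config.filter (fun p => p.2)).map (fun p => p.1)
  PySem.List.sorted enabled (fun name => order_index.getD name sentinel) false

-- ===== PRECONDITION & SPEC =====
-- Pre_ excludes association lists whose "modules" value carries duplicate module names: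
-- such lists do not represent any Python dict (A receives a dict, whose keys are unique),
-- and on them A's growing-list membership dedup and B's stable sort are both accidental.
def Pre_get_enabled_modules_py (event_config : List (String × List (String × Bool))) : Prop :=
  (((((event_config.find? (fun p => p.1 == "modules")).map (·.2)).getD []).map Prod.fst)).Nodup
instance (event_config : List (String × List (String × Bool))) : Decidable (Pre_get_enabled_modules_py event_config) := by unfold Pre_get_enabled_modules_py; infer_instance

def pvWitness_get_enabled_modules_py : (List (String × List (String × Bool))) :=
  [("modules", [("subtitles", true), ("extra_module", true), ("archive", false)])]

def Spec_get_enabled_modules_py (event_config : List (String × List (String × Bool))) (out : List String) : Prop := out = get_enabled_modules_py_alt event_config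
instance (event_config : List (String × List (String × Bool))) (out : List String) : Decidable (Spec_get_enabled_modules_py event_config out) := by unfold Spec_get_enabled_modules_py; infer_instance

-- ===== CLAIM (what is proved, stated in full; the proofs are below) =====
def Claim_equal_get_enabled_modules_py : Prop := ∀ (event_config : List (String × List (String × Bool))), Dom_get_enabled_modules_py event_config → Pre_get_enabled_modules_py event_config → Spec_get_enabled_modules_py event_config (get_enabled_modules_py event_config)

-- ===== LEMMAS AND PROOFS =====

-- Proof-side names for the pieces both ports share.
def pvMO : List String :=
  ["subtitles", "subtitle_correction", "content_summary", "thumbnail_ai",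
   "thumbnail_compose", "ai_content", "publish_youtube", "publish_website",
   "archive", "live_control", "ingest_obs_monitor"]

def pvRank (name : String) : Int :=
  (((PySem.List.enumerate pvMO).foldl (fun d p => d.insert p.2 p.1) PySem.Dict.empty :
    PySem.Dict String Int)).getD name 11

-- pvRank characterised through idxOf
theorem pv_idxOf_append (l : List String) (m : String) (h : m ∉ l) :
    (l ++ [m]).idxOf m = l.length := by
  induction l with
  | nil => simp
  | cons a l ih =>
    simp only [List.mem_cons, not_or] at h
    simp only [List.idxOf, List.cons_append, List.findIdx_cons,
      beq_false_of_ne (Ne.symm h.1), Bool.cond_false]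
    have := ih h.2
    simp only [List.idxOf] at this
    simp [this]

theorem pv_oi_get? (ms : List String) (hnd : ms.Nodup) (x : String) :
    (((PySem.List.enumerate ms).foldl (fun d p => d.insert p.2 p.1) PySem.Dict.empty :
      PySem.Dict String Int)).get? x
      = if x ∈ ms then some ((ms.idxOf x : Nat) : Int) else none := by
  induction ms using List.reverseRecOn with
  | nil => simp [PySem.List.enumerate]
  | append_singleton ms m ih =>
    have hnd' : ms.Nodup := hnd.sublist (List.sublist_append_left ms [m])
    have hm : m ∉ ms := by
      intro hc
      have := List.disjoint_of_nodup_append hnd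
      exact this hc (by simp)
    rw [show PySem.List.enumerate (ms ++ [m]) = PySem.List.enumerate ms ++ [((ms.length : Int), m)]
      from by simp [PySem.List.enumerate_append]]
    rw [List.foldl_append]
    simp only [List.foldl_cons, List.foldl_nil]
    rw [PySem.Dict.get?_insert]
    by_cases hx : x = m
    · subst hx
      rw [if_pos rfl, if_pos (by simp), pv_idxOf_append ms x hm]
    · rw [if_neg hx, ih hnd']
      by_cases hxm : x ∈ ms
      · rw [if_pos hxm, if_pos (by simp [hxm]), List.idxOf_append_of_mem hxm]
      · rw [if_neg hxm, if_neg (by simp [hxm, hx])]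

theorem pvRank_char (x : String) :
    pvRank x = if x ∈ pvMO then ((pvMO.idxOf x : Nat) : Int) else 11 := by
  rw [pvRank, PySem.Dict.getD_eq_get?_getD, pv_oi_get? pvMO (by decide) x]
  by_cases h : x ∈ pvMO <;> simp [h]

theorem pvRank_bounds (x : String) : 0 ≤ pvRank x ∧ pvRank x < 12 := by
  rw [pvRank_char]
  by_cases h : x ∈ pvMO
  · have h1 : pvMO.idxOf x < pvMO.length := List.idxOf_lt_length_of_mem h
    have h2 : pvMO.length = 11 := by decide
    rw [if_pos h]; omega
  · rw [if_neg h]; omega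

theorem pvRank_lt_iff (x : String) (i : Nat) (hi : i < 11) :
    (pvRank x == (i : Int)) = decide (x = pvMO.getD i "") := by
  have hlen : pvMO.length = 11 := by decide
  have hgd : pvMO.getD i "" = pvMO[i]'(by omega) := List.getD_eq_getElem pvMO "" (by omega)
  rw [pvRank_char]
  by_cases h : x ∈ pvMO
  · rw [if_pos h]
    by_cases he : pvMO.idxOf x = i
    · subst he
      have h3 : pvMO[pvMO.idxOf x]'(by omega) = x :=
        List.getElem_idxOf (List.idxOf_lt_length_of_mem h)
      rw [hgd]
      simp [h3]
    · have hne : x ≠ pvMO[i]'(by omega) := by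
        intro hx
        exact he (by rw [hx]; exact List.Nodup.idxOf_getElem (by decide) i (by omega))
      simp only [hgd]
      simp [he, hne]
  · rw [if_neg h, hgd]
    have hmem : pvMO[i]'(by omega) ∈ pvMO := List.getElem_mem _
    have hne : x ≠ pvMO[i]'(by omega) := fun hx => h (hx ▸ hmem)
    have h11 : ((11 : Int) == (i : Int)) = false := by
      simp only [beq_eq_false_iff_ne, ne_eq]
      omega
    simp [h11, hne]

theorem pvRank_sentinel (x : String) :
    (pvRank x == (11 : Int)) = !(pvMO.contains x) := by
  rw [pvRank_char]
  by_cases h : x ∈ pvMO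
  · have h1 : pvMO.idxOf x < pvMO.length := List.idxOf_lt_length_of_mem h
    have h2 : pvMO.length = 11 := by decide
    have : ((pvMO.idxOf x : Nat) : Int) ≠ 11 := by omega
    simp [h, List.contains_eq_mem, this]
  · simp [h, List.contains_eq_mem]

-- insertBy passes over a prefix it must not go before
theorem pv_insertBy_append_left {α : Type} (b : α → α → Bool) (x : α) (ys zs : List α)
    (h : ∀ y ∈ ys, b x y = false) :
    PySem.List.insertBy b x (ys ++ zs) = ys ++ PySem.List.insertBy b x zs := by
  induction ys with
  | nil => rfl
  | cons y ys ih =>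
    simp only [List.cons_append, PySem.List.insertBy, h y (by simp)]
    simp only [Bool.false_eq_true, if_false]
    rw [ih (fun y hy => h y (by simp [hy]))]

theorem pv_insertBy_all_before {α : Type} (b : α → α → Bool) (x : α) (zs : List α)
    (h : ∀ z ∈ zs, b x z = true) :
    PySem.List.insertBy b x zs = x :: zs := by
  cases zs with
  | nil => rfl
  | cons z zs => simp [PySem.List.insertBy, h z (by simp)]

-- the stable sort by an Int key bounded by N is the concatenation of the key buckets
theorem pv_sorted_buckets {α : Type} (key : α → Int) (N : Nat) (L : List α)
    (hb : ∀ x ∈ L, 0 ≤ key x ∧ key x < N) :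
    PySem.List.sorted L key false
      = (List.range N).flatMap (fun (i : Nat) => L.filter (fun x => key x == (i : Int))) := by
  induction L using List.reverseRecOn with
  | nil => simp [PySem.List.sorted]
  | append_singleton l x ih =>
    have hx := hb x (by simp)
    have hl : ∀ y ∈ l, 0 ≤ key y ∧ key y < N := fun y hy => hb y (by simp [hy])
    set k : Nat := (key x).toNat with hk
    have hkey : key x = (k : Int) := by omega
    have hkN : k < N := by omega
    have hsplit : N = (k + 1) + (N - (k + 1)) := by omega
    rw [PySem.List.sorted_eq_foldl_insertBy, List.foldl_append,
        ← PySem.List.sorted_eq_foldl_insertBy, ih hl]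
    simp only [List.foldl_cons, List.foldl_nil]
    rw [hsplit, List.range_add, List.flatMap_append, List.flatMap_append]
    have hP : ∀ y ∈ (List.range (k + 1)).flatMap
        (fun (i : Nat) => l.filter (fun z => key z == (i : Int))),
        (decide (key x < key y)) = false := by
      intro y hy
      simp only [List.mem_flatMap, List.mem_range, List.mem_filter] at hy
      obtain ⟨i, hi, _, hkey_y⟩ := hy
      have hy' : key y = (i : Int) := by simpa using hkey_y
      simp only [decide_eq_false_iff_not, not_lt, hkey, hy']
      exact_mod_cast Nat.le_of_lt_succ hi
    have hS : ∀ z ∈ ((List.range (N - (k + 1))).map ((k+1) + ·)).flatMap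
        (fun (i : Nat) => l.filter (fun y => key y == (i : Int))),
        (decide (key x < key z)) = true := by
      intro z hz
      simp only [List.mem_flatMap, List.mem_map, List.mem_range, List.mem_filter] at hz
      obtain ⟨i, ⟨j, hj, rfl⟩, _, hkz⟩ := hz
      have hz' : key z = ((k + 1 + j : Nat) : Int) := by simpa using hkz
      simp only [decide_eq_true_eq, hkey, hz']
      push_cast; omega
    rw [pv_insertBy_append_left _ _ _ _ hP, pv_insertBy_all_before _ _ _ hS]
    have hfx : ∀ (i : Nat), (l ++ [x]).filter (fun z => key z == (i : Int))
        = l.filter (fun z => key z == (i : Int)) ++ (if key x == (i:Int) then [x] else []) := by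
      intro i; rw [List.filter_append]; cases h : (key x == (i : Int)) <;> simp [List.filter, h]
    have h1 : (List.range (k+1)).flatMap
          (fun (i : Nat) => (l ++ [x]).filter (fun z => key z == (i : Int)))
        = (List.range (k+1)).flatMap
            (fun (i : Nat) => l.filter (fun z => key z == (i : Int))) ++ [x] := by
      rw [List.range_succ, List.flatMap_append, List.flatMap_append]
      rw [List.append_assoc]
      congr 1
      · apply List.flatMap_congr
        intro i hi
        rw [hfx i]
        have hne : (key x == ((i : Nat) : Int)) = false := by
          simp only [List.mem_range] at hi
          simp only [hkey, beq_eq_false_iff_ne, ne_eq, Int.natCast_inj]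
          omega
        simp [hne]
      · simp only [List.flatMap_cons, List.flatMap_nil, List.append_nil]
        rw [hfx k]
        simp [hkey]
    have h2 : ((List.range (N - (k + 1))).map ((k+1) + ·)).flatMap
          (fun (i : Nat) => (l ++ [x]).filter (fun z => key z == (i : Int)))
        = ((List.range (N - (k + 1))).map ((k+1) + ·)).flatMap
          (fun (i : Nat) => l.filter (fun z => key z == (i : Int))) := by
      apply List.flatMap_congr
      intro i hi
      simp only [List.mem_map, List.mem_range] at hi
      obtain ⟨j, hj, rfl⟩ := hi
      rw [hfx]
      simp only [beq_iff_eq]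
      rw [if_neg (show ¬ key x = ((k + 1 + j : Nat) : Int) by push_cast [hkey]; omega)]
      simp
    rw [h1, h2, List.append_assoc]
    rfl

-- first-match boolean lookup in an assoc list with distinct keys = membership among enabled names
theorem pv_lookup_eq_mem (mc : List (String × Bool)) (h : (mc.map Prod.fst).Nodup) (m : String) :
    ((mc.find? (fun p => p.1 == m)).map (·.2)).getD false
      = decide (m ∈ (mc.filter (fun p => p.2)).map Prod.fst) := by
  induction mc with
  | nil => simp
  | cons a mc ih =>
    simp only [List.map_cons, List.nodup_cons] at h
    by_cases hm : a.1 = m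
    · subst hm
      rw [List.find?_cons_of_pos (by simp)]
      cases hv : a.2 with
      | true => simp [hv]
      | false =>
        have : a.1 ∉ (mc.filter (fun p => p.2)).map Prod.fst := by
          intro hc
          exact h.1 (by
            obtain ⟨p, hp, he⟩ := List.mem_map.mp hc
            exact he ▸ List.mem_map_of_mem (List.mem_of_mem_filter hp))
        simp [hv, this]
    · rw [List.find?_cons_of_neg (by simp [hm])]
      rw [ih h.2]
      by_cases hv : a.2 = true <;> simp [hv, Ne.symm hm]

-- elements of a nodup-keyed assoc list: the name is among the enabled names iff the flag is set
theorem pv_mem_enabled_iff (mc : List (String × Bool)) (h : (mc.map Prod.fst).Nodup)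
    (p : String × Bool) (hp : p ∈ mc) :
    (p.1 ∈ (mc.filter (fun q => q.2)).map Prod.fst) ↔ p.2 = true := by
  constructor
  · intro hm
    obtain ⟨q, hq, he⟩ := List.mem_map.mp hm
    have hq' := List.mem_of_mem_filter hq
    have hpw : mc.Pairwise (fun a b => a.1 ≠ b.1) := List.pairwise_map.mp h
    have : q = p := by
      by_contra hne
      exact hpw.forall (fun a b hab => hab.symm) hq' hp hne he
    subst this
    exact (List.mem_filter.mp hq).2
  · intro hv
    exact List.mem_map_of_mem (List.mem_filter.mpr ⟨hp, by simp [hv]⟩)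

-- A's second loop appends exactly the enabled names outside ms, given the accumulator
-- already contains exactly the enabled names inside ms
theorem pv_extras_fold (ms : List String) :
    ∀ (mc : List (String × Bool)) (acc : List String), (mc.map Prod.fst).Nodup →
    (∀ p ∈ mc, p.1 ∈ acc ↔ (p.2 = true ∧ p.1 ∈ ms)) →
    mc.foldl (fun acc p => if p.2 && !(acc.contains p.1) then acc ++ [p.1] else acc) acc
      = acc ++ (mc.filter (fun p => p.2 && !(ms.contains p.1))).map Prod.fst := by
  intro mc
  induction mc with
  | nil => intro acc _ _; simp
  | cons p mc ih =>
    intro acc hnd hinv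
    simp only [List.map_cons, List.nodup_cons] at hnd
    have hp := hinv p (by simp)
    have hrest : ∀ q ∈ mc, q.1 ∈ acc ↔ (q.2 = true ∧ q.1 ∈ ms) :=
      fun q hq => hinv q (by simp [hq])
    rw [List.foldl_cons]
    cases hv : p.2 with
    | false =>
      have hc : (if (false && !(acc.contains p.1)) = true then acc ++ [p.1] else acc) = acc := by
        simp
      rw [hc, ih acc hnd.2 hrest]
      simp [hv]
    | true =>
      by_cases hm : p.1 ∈ ms
      · have hacc : p.1 ∈ acc := hp.mpr ⟨hv, hm⟩
        have hc : (if (true && !(acc.contains p.1)) = true then acc ++ [p.1] else acc) = acc := by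
          simp [List.contains_eq_mem, hacc]
        rw [hc, ih acc hnd.2 hrest]
        simp [List.contains_eq_mem, hm]
      · have hacc : p.1 ∉ acc := fun hc => hm (hp.mp hc).2
        have hc : (if (true && !(acc.contains p.1)) = true then acc ++ [p.1] else acc)
            = acc ++ [p.1] := by
          simp [List.contains_eq_mem, hacc]
        have hinv' : ∀ q ∈ mc, q.1 ∈ acc ++ [p.1] ↔ (q.2 = true ∧ q.1 ∈ ms) := by
          intro q hq
          have hne : q.1 ≠ p.1 := fun he => hnd.1 (he ▸ List.mem_map_of_mem hq)
          rw [List.mem_append]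
          constructor
          · rintro (h1 | h1)
            · exact (hrest q hq).mp h1
            · simp at h1; exact absurd h1 hne
          · intro h1; exact Or.inl ((hrest q hq).mpr h1)
        rw [hc, ih (acc ++ [p.1]) hnd.2 hinv']
        simp [List.contains_eq_mem, hm, hv]

-- a filter to a single possible element of a nodup list
theorem pv_filter_singleton (L : List String) (h : L.Nodup) (m : String) :
    L.filter (fun x => decide (x = m)) = if m ∈ L then [m] else [] := by
  induction L with
  | nil => simp
  | cons a L ih =>
    simp only [List.nodup_cons] at h
    by_cases ha : a = m
    · subst ha
      have : a ∉ L := h.1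
      simp [ih h.2, this]
    · simp [ha, ih h.2, Ne.symm ha]

-- filter written as a flatMap of singletons
theorem pv_filter_eq_flatMap {α : Type} (L : List α) (p : α → Bool) :
    L.filter p = L.flatMap (fun m => if p m then [m] else []) := by
  induction L with
  | nil => rfl
  | cons a L ih =>
    by_cases ha : p a = true <;> simp [List.flatMap_cons, ha, ih]

-- ===== VERDICT (by name: the statement is the Claim_ definition above) =====
theorem get_enabled_modules_py_spec : Claim_equal_get_enabled_modules_py := by
  intro ec _hdom hpre
  unfold Spec_get_enabled_modules_py
  set mc : List (String × Bool) := ((ec.find? (fun p => p.1 == "modules")).map (·.2)).getD []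
    with hmc
  have hnd : (mc.map Prod.fst).Nodup := hpre
  set L : List String := (mc.filter (fun p => p.2)).map Prod.fst with hL
  have hLnd : L.Nodup := by
    have hsub : ((mc.filter (fun p => p.2)).map Prod.fst).Sublist (mc.map Prod.fst) :=
      List.Sublist.map Prod.fst List.filter_sublist
    exact hsub.nodup hnd
  -- B's side
  have hB : get_enabled_modules_py_alt ec = PySem.List.sorted L pvRank false := by
    rfl
  -- bucket the sort
  have hbuckets := pv_sorted_buckets pvRank 12 L (fun x _ => pvRank_bounds x)
  -- A's side
  have hA : get_enabled_modules_py ec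
      = (pvMO.filter (fun m => decide (m ∈ L)))
        ++ (mc.filter (fun p => p.2 && !(pvMO.contains p.1))).map Prod.fst := by
    show mc.foldl (fun acc p => if p.2 && !(acc.contains p.1) then acc ++ [p.1] else acc)
        (pvMO.foldl (fun acc m =>
          if ((mc.find? (fun p => p.1 == m)).map (·.2)).getD false then acc ++ [m] else acc) [])
      = _
    have h1 : (pvMO.foldl (fun acc m =>
          if ((mc.find? (fun p => p.1 == m)).map (·.2)).getD false then acc ++ [m] else acc) [])
        = pvMO.filter (fun m => decide (m ∈ L)) := by
      have := PySem.List.foldl_append_if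
        (fun m => ((mc.find? (fun p => p.1 == m)).map (·.2)).getD false) (fun m => m) pvMO []
      rw [this]
      simp only [List.nil_append, List.map_id']
      apply List.filter_congr
      intro m _
      exact pv_lookup_eq_mem mc hnd m
    rw [h1]
    apply pv_extras_fold pvMO mc (pvMO.filter (fun m => decide (m ∈ L))) hnd
    intro p hp
    rw [List.mem_filter]
    constructor
    · rintro ⟨h1, h2⟩
      exact ⟨(pv_mem_enabled_iff mc hnd p hp).mp (of_decide_eq_true h2), h1⟩
    · rintro ⟨h1, h2⟩
      exact ⟨h2, decide_eq_true ((pv_mem_enabled_iff mc hnd p hp).mpr h1)⟩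
  rw [hA, hB, hbuckets]
  -- split off the sentinel bucket
  have h12 : List.range 12 = List.range 11 ++ [11] := by decide
  rw [h12, List.flatMap_append]
  congr 1
  · -- predefined part
    have hmap : (List.range 11).map (fun i => pvMO.getD i "") = pvMO := by decide
    calc pvMO.filter (fun m => decide (m ∈ L))
        = pvMO.flatMap (fun m => if m ∈ L then [m] else []) := by
          rw [pv_filter_eq_flatMap]; simp
      _ = ((List.range 11).map (fun i => pvMO.getD i "")).flatMap
            (fun m => if m ∈ L then [m] else []) := by rw [hmap]
      _ = (List.range 11).flatMap (fun (i : Nat) => if pvMO.getD i "" ∈ L then [pvMO.getD i ""] else []) := by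
          rw [List.flatMap_map]
      _ = (List.range 11).flatMap (fun (i : Nat) => L.filter (fun x => pvRank x == (i : Int))) := by
          apply List.flatMap_congr
          intro i hi
          have hi11 : i < 11 := List.mem_range.mp hi
          rw [List.filter_congr (fun x _ => pvRank_lt_iff x i hi11),
              pv_filter_singleton L hLnd]
  · -- extras part
    simp only [List.flatMap_cons, List.flatMap_nil, List.append_nil]
    rw [List.filter_congr (fun x _ =>
      (by simpa using pvRank_sentinel x :
        (pvRank x == ((11 : Nat) : Int)) = !(pvMO.contains x)))]
    rw [hL, List.filter_map, List.filter_filter]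
    congr 1
    apply List.filter_congr
    intro p _
    simp [Function.comp, Bool.and_comm]
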